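-- pv_equiv track=rewrite | github.com/MulliganB/ComputerComponentShop | preReleaseMaterial.py | correctStock
-- ===== SOURCE A (Python) =====
-- def correctStock(cart, stock):
--     for key in stock:
--         if key == "Processors":
--             for key1 in cart:
--                 if key1 == "p3":
--                     stock[key].update({"p3": stock[key]["p3"]-cart[key1][1]})
--                 elif key1 == "p5":
--                     stock[key].update({"p5": stock[key]["p5"]-cart[key1][1]})
--                 elif key1 == "p7":
--                     stock[key].update({"p7": stock[key]["p7"]-cart[key1][1]})
--         if key == "RAM":
--             for key1 in cart:
--                 if key1 == "16GB":
--                     stock[key].update({"16GB": stock[key]["16GB"]-cart[key1][1]})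
--                 elif key1 == "32GB":
--                     stock[key].update({"32GB": stock[key]["32GB"]-cart[key1][1]})
--         if key == "Storage":
--             for key1 in cart:
--                 if key1 == "1TB":
--                     stock[key].update({"1TB": stock[key]["1TB"]-cart[key1][1]})
--                 elif key1 == "2TB":
--                     stock[key].update({"2TB": stock[key]["2TB"]-cart[key1][1]})
--         if key == "Screen":
--             for key1 in cart:
--                 if key1 == "19inch":
--                     stock[key].update({"19inch": stock[key]["19inch"]-cart[key1][1]})
--                 elif key1 == "23inch":
--                     stock[key].update({"23inch": stock[key]["23inch"]-cart[key1][1]})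
--         if key == "Case":
--             for key1 in cart:
--                 if key1 == "Mini Tower":
--                     stock[key].update({"Mini Tower": stock[key]["Mini Tower"]-cart[key1][1]})
--                 elif key1 == "Midi Tower":
--                     stock[key].update({"Midi Tower": stock[key]["Midi Tower"]-cart[key1][1]})
--         if key == "USB Ports":
--             for key1 in cart:
--                 if key1 == "2 Ports":
--                     stock[key].update({"2 Ports": stock[key]["2 Ports"]-cart[key1][1]})
--                 elif key1 == "4 Ports":
--                     stock[key].update({"4 Ports": stock[key]["4 Ports"]-cart[key1][1]})
--
--     return stock
-- ===== SOURCE B (Python) =====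
-- CATEGORY = {
--     "p3": "Processors", "p5": "Processors", "p7": "Processors",
--     "16GB": "RAM", "32GB": "RAM",
--     "1TB": "Storage", "2TB": "Storage",
--     "19inch": "Screen", "23inch": "Screen",
--     "Mini Tower": "Case", "Midi Tower": "Case",
--     "2 Ports": "USB Ports", "4 Ports": "USB Ports",
-- }
--
--
-- def correctStock(cart, stock):
--     for prod, entry in cart.items():
--         cat = CATEGORY.get(prod)
--         if cat is not None and cat in stock:
--             stock[cat][prod] = stock[cat][prod] - entry[1]
--     return stock
-- ===== Notes on version B (the rewrite author's own statement) =====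
-- stated objective: idiomatic
-- what changed: Replaces A's six hard-coded per-category cart scans nested inside a loop over stock by a product-to-category lookup table and a single pass over the cart.
import Mathlib
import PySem

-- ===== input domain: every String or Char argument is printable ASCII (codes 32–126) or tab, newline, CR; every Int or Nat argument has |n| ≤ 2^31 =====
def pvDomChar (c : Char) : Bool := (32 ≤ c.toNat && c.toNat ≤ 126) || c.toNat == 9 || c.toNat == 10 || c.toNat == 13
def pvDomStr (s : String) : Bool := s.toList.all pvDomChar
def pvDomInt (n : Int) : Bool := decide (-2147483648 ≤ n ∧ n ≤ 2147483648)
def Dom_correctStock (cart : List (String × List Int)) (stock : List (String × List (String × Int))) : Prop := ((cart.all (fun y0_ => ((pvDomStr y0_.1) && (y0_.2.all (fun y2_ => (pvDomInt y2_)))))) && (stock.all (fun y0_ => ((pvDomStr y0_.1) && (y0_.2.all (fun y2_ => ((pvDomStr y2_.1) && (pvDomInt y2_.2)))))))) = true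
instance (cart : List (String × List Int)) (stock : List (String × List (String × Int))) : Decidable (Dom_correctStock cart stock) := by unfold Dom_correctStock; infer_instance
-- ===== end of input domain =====

-- B replaces A's six nested per-category scans of the cart by one table-driven pass over the cart
-- (a product→category dict); objective: simpler/idiomatic; return value only (both Pythons mutate
-- `stock` in place identically).

-- python-dict primitives on association lists (shared vocabulary of both ports):
-- d[k] read, first match; the default is only reached outside Pre_, where Python raises
def dGet {v : Type} (d : List (String × v)) (k : String) (dflt : v) : v :=
  ((d.find? (fun e => e.1 == k)).map (·.2)).getD dflt

-- d[k] = v  (overwrite in place; append when the key is new)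
def dSet {v : Type} (d : List (String × v)) (k : String) (x : v) : List (String × v) :=
  if d.any (fun e => e.1 == k) then d.map (fun e => if e.1 == k then (k, x) else e)
  else d ++ [(k, x)]

-- ===== PORT A =====
-- stock[key].update({prod: stock[key][prod] - cart[prod][1]})
def updA (cart : List (String × List Int)) (st : List (String × List (String × Int)))
    (key prod : String) : List (String × List (String × Int)) :=
  dSet st key (dSet (dGet st key []) prod
    (dGet (dGet st key []) prod 0 - PySem.List.pyGetD (dGet cart prod []) 1 0))

-- one outer-loop iteration of A: the six sequential category blocks
def stepA (cart : List (String × List Int)) (st : List (String × List (String × Int)))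
    (key : String) : List (String × List (String × Int)) :=
  let st := if key == "Processors" then
      cart.foldl (fun st q =>
        if q.1 == "p3" then updA cart st key "p3"
        else if q.1 == "p5" then updA cart st key "p5"
        else if q.1 == "p7" then updA cart st key "p7" else st) st
    else st
  let st := if key == "RAM" then
      cart.foldl (fun st q =>
        if q.1 == "16GB" then updA cart st key "16GB"
        else if q.1 == "32GB" then updA cart st key "32GB" else st) st
    else st
  let st := if key == "Storage" then
      cart.foldl (fun st q =>
        if q.1 == "1TB" then updA cart st key "1TB"
        else if q.1 == "2TB" then updA cart st key "2TB" else st) st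
    else st
  let st := if key == "Screen" then
      cart.foldl (fun st q =>
        if q.1 == "19inch" then updA cart st key "19inch"
        else if q.1 == "23inch" then updA cart st key "23inch" else st) st
    else st
  let st := if key == "Case" then
      cart.foldl (fun st q =>
        if q.1 == "Mini Tower" then updA cart st key "Mini Tower"
        else if q.1 == "Midi Tower" then updA cart st key "Midi Tower" else st) st
    else st
  let st := if key == "USB Ports" then
      cart.foldl (fun st q =>
        if q.1 == "2 Ports" then updA cart st key "2 Ports"
        else if q.1 == "4 Ports" then updA cart st key "4 Ports" else st) st
    else st
  st

def correctStock (cart : List (String × List Int)) (stock : List (String × List (String × Int))) :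
    List (String × List (String × Int)) :=
  (stock.map Prod.fst).foldl (stepA cart) stock

-- ===== PORT B =====
-- the CATEGORY dict of Source B
def CATEGORY : PySem.Dict String String := PySem.Dict.ofList
  [("p3", "Processors"), ("p5", "Processors"), ("p7", "Processors"),
   ("16GB", "RAM"), ("32GB", "RAM"),
   ("1TB", "Storage"), ("2TB", "Storage"),
   ("19inch", "Screen"), ("23inch", "Screen"),
   ("Mini Tower", "Case"), ("Midi Tower", "Case"),
   ("2 Ports", "USB Ports"), ("4 Ports", "USB Ports")]

-- stock[cat][prod] = stock[cat][prod] - entry[1]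
def updB (st : List (String × List (String × Int))) (cat prod : String) (entry : List Int) :
    List (String × List (String × Int)) :=
  dSet st cat (dSet (dGet st cat []) prod
    (dGet (dGet st cat []) prod 0 - PySem.List.pyGetD entry 1 0))

def correctStock_alt (cart : List (String × List Int))
    (stock : List (String × List (String × Int))) : List (String × List (String × Int)) :=
  cart.foldl (fun st q =>
    match CATEGORY.get? q.1 with
    | none => st
    | some cat => if st.any (fun e => e.1 == cat) then updB st cat q.1 q.2 else st) stock

-- ===== PRECONDITION & SPEC =====
-- Pre_ excludes association lists with duplicate keys (they represent no Python dict) and the inputs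
-- on which A raises: KeyError when a stock category lacks the subkey of a carted product of that
-- category, IndexError when such a product's cart entry has fewer than 2 elements.
def Pre_correctStock (cart : List (String × List Int)) (stock : List (String × List (String × Int))) : Prop :=
  (cart.map Prod.fst).Nodup ∧ (stock.map Prod.fst).Nodup ∧
  (∀ e ∈ stock, ∀ q ∈ cart, CATEGORY.get? q.1 = some e.1 →
     2 ≤ q.2.length ∧ e.2.any (fun s => s.1 == q.1) = true)
instance (cart : List (String × List Int)) (stock : List (String × List (String × Int))) : Decidable (Pre_correctStock cart stock) := by unfold Pre_correctStock; infer_instance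

def pvWitness_correctStock : (List (String × List Int)) × (List (String × List (String × Int))) :=
  ([("p3", [0, 2]), ("32GB", [0, 1])],
   [("Processors", [("p3", 10), ("p5", 4)]), ("RAM", [("32GB", 7)])])

def Spec_correctStock (cart : List (String × List Int)) (stock : List (String × List (String × Int))) (out : List (String × List (String × Int))) : Prop := out = correctStock_alt cart stock
instance (cart : List (String × List Int)) (stock : List (String × List (String × Int))) (out : List (String × List (String × Int))) : Decidable (Spec_correctStock cart stock out) := by unfold Spec_correctStock; infer_instance

-- ===== CLAIM (what is proved, stated in full; the proofs are below) =====
def Claim_equal_correctStock : Prop := ∀ (cart : List (String × List Int)) (stock : List (String × List (String × Int))), Dom_correctStock cart stock → Pre_correctStock cart stock → Spec_correctStock cart stock (correctStock cart stock)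

-- ===== LEMMAS AND PROOFS =====

-- proof-only helpers --------------------------------------------------------

-- the per-cart-item update of one category's sub-dict
def subStep (amt : String × List Int → Int) (k : String) (sub : List (String × Int))
    (q : String × List Int) : List (String × Int) :=
  if CATEGORY.get? q.1 == some k then dSet sub q.1 (dGet sub q.1 0 - amt q) else sub

-- the same update lifted to the whole stock
def stStep (amt : String × List Int → Int) (k : String)
    (st : List (String × List (String × Int))) (q : String × List Int) :
    List (String × List (String × Int)) :=
  if CATEGORY.get? q.1 == some k then
    dSet st k (dSet (dGet st k []) q.1 (dGet (dGet st k []) q.1 0 - amt q)) else st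

def amtA (cart : List (String × List Int)) (q : String × List Int) : Int :=
  PySem.List.pyGetD (dGet cart q.1 []) 1 0

def amtB (q : String × List Int) : Int := PySem.List.pyGetD q.2 1 0

-- modify (all) entries with key k by f
def modS {v : Type} (st : List (String × v)) (k : String) (f : v → v) : List (String × v) :=
  st.map (fun e => if e.1 = k then (k, f e.2) else e)

lemma cat_pairs (p c : String) (h : CATEGORY.get? p = some c) :
    (p, c) ∈ [("p3", "Processors"), ("p5", "Processors"), ("p7", "Processors"),
      ("16GB", "RAM"), ("32GB", "RAM"), ("1TB", "Storage"), ("2TB", "Storage"),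
      ("19inch", "Screen"), ("23inch", "Screen"), ("Mini Tower", "Case"),
      ("Midi Tower", "Case"), ("2 Ports", "USB Ports"), ("4 Ports", "USB Ports")] := by
  have h2 := PySem.Dict.mem_items_of_get?_eq_some CATEGORY h
  rwa [show CATEGORY.items = _ from rfl] at h2

lemma cat_snd (p c : String) (h : CATEGORY.get? p = some c) :
    c = "Processors" ∨ c = "RAM" ∨ c = "Storage" ∨ c = "Screen" ∨ c = "Case" ∨
      c = "USB Ports" := by
  have h2 := cat_pairs p c h
  simp only [List.mem_cons, List.not_mem_nil, or_false, Prod.mk.injEq] at h2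
  rcases h2 with ⟨_,h⟩|⟨_,h⟩|⟨_,h⟩|⟨_,h⟩|⟨_,h⟩|⟨_,h⟩|⟨_,h⟩|⟨_,h⟩|⟨_,h⟩|⟨_,h⟩|⟨_,h⟩|⟨_,h⟩|⟨_,h⟩ <;>
    simp [h]

lemma modS_cons {v : Type} (a : String × v) (t : List (String × v)) (k : String) (f : v → v) :
    modS (a :: t) k f = (if a.1 = k then (k, f a.2) else a) :: modS t k f := rfl

lemma keys_modS {v : Type} (st : List (String × v)) (k : String) (f : v → v) :
    (modS st k f).map Prod.fst = st.map Prod.fst := by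
  unfold modS
  rw [List.map_map]
  apply List.map_congr_left
  intro e _
  by_cases h : e.1 = k <;> simp [h]

lemma modS_id {v : Type} (st : List (String × v)) (k : String) :
    modS st k (fun s => s) = st := by
  unfold modS
  conv_rhs => rw [← List.map_id st]
  apply List.map_congr_left
  intro e _
  by_cases h : e.1 = k <;> simp [h]
  rw [← h]

lemma modS_of_not_mem {v : Type} (st : List (String × v)) (k : String) (f : v → v)
    (h : k ∉ st.map Prod.fst) : modS st k f = st := by
  unfold modS
  conv_rhs => rw [← List.map_id st]
  apply List.map_congr_left
  intro e he
  have : e.1 ≠ k := fun hek => h (hek ▸ List.mem_map_of_mem he)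
  simp [this]

lemma modS_modS {v : Type} (st : List (String × v)) (k : String) (f g : v → v) :
    modS (modS st k f) k g = modS st k (fun s => g (f s)) := by
  unfold modS
  rw [List.map_map]
  apply List.map_congr_left
  intro e _
  by_cases h : e.1 = k <;> simp [h]

lemma any_key_of_mem {v : Type} (st : List (String × v)) (k : String)
    (h : k ∈ st.map Prod.fst) : st.any (fun e => e.1 == k) = true := by
  obtain ⟨x, hx, hfst⟩ := List.mem_map.1 h
  rw [List.any_eq_true]
  exact ⟨x, hx, by simp [hfst]⟩

lemma dSet_eq_modS {v : Type} (st : List (String × v)) (k : String) (x : v)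
    (h : st.any (fun e => e.1 == k) = true) : dSet st k x = modS st k (fun _ => x) := by
  simp only [dSet, h, if_true, modS]
  apply List.map_congr_left
  intro e _
  by_cases he : e.1 = k <;> simp [he]

lemma dGet_eq_of_mem {v : Type} (st : List (String × v)) (k : String) (b : v) (d0 : v)
    (hnd : (st.map Prod.fst).Nodup) (h : (k, b) ∈ st) : dGet st k d0 = b := by
  induction st with
  | nil => simp at h
  | cons e t ih =>
    rw [List.map_cons, List.nodup_cons] at hnd
    rcases List.mem_cons.1 h with h | h
    · rw [← h]; simp [dGet]
    · have hk : e.1 ≠ k := fun he => hnd.1 (he ▸ List.mem_map_of_mem h)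
      have := ih hnd.2 h
      simp only [dGet] at this ⊢
      rw [List.find?_cons_of_neg (by simp [hk])]
      exact this

lemma modS_congr_entry {v : Type} (st : List (String × v)) (k : String) (f g : v → v) (d0 : v)
    (hnd : (st.map Prod.fst).Nodup) (hk : k ∈ st.map Prod.fst)
    (h : f (dGet st k d0) = g (dGet st k d0)) : modS st k f = modS st k g := by
  induction st with
  | nil => rfl
  | cons e t ih =>
    rw [List.map_cons, List.nodup_cons] at hnd
    by_cases he : e.1 = k
    · have hkt : k ∉ t.map Prod.fst := he ▸ hnd.1
      have hdg : dGet (e :: t) k d0 = e.2 := by simp [dGet, he]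
      rw [hdg] at h
      rw [modS_cons, modS_cons, if_pos he, if_pos he, h,
        modS_of_not_mem t k f hkt, modS_of_not_mem t k g hkt]
    · have hkt : k ∈ t.map Prod.fst := by
        have : k = e.1 ∨ k ∈ t.map Prod.fst := by simpa using hk
        rcases this with h' | h'
        · exact absurd h'.symm he
        · exact h'
      have hdg : dGet (e :: t) k d0 = dGet t k d0 := by
        simp only [dGet]
        rw [List.find?_cons_of_neg (by simp [he])]
      rw [hdg] at h
      rw [modS_cons, modS_cons, if_neg he, if_neg he]
      exact congrArg (List.cons e) (ih hnd.2 hkt h)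

lemma foldl_fix {a b : Type} (l : List b) (f : a → b → a) (st : a)
    (h : ∀ st q, q ∈ l → f st q = st) : l.foldl f st = st := by
  induction l generalizing st with
  | nil => rfl
  | cons q t ih =>
    rw [List.foldl_cons, h st q (by simp)]
    exact ih st (fun st' q' hq' => h st' q' (by simp [hq']))

-- LOOP LEMMA 1: A's inner loop over the cart only touches stock entry k
lemma foldl_stStep_eq_modS (amt : String × List Int → Int) (k : String)
    (l : List (String × List Int)) :
    ∀ st : List (String × List (String × Int)), (st.map Prod.fst).Nodup →
      k ∈ st.map Prod.fst →
      l.foldl (stStep amt k) st = modS st k (fun sub => l.foldl (subStep amt k) sub) := by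
  induction l with
  | nil => intro st _ _; exact (modS_id st k).symm
  | cons q l ih =>
    intro st hnd hk
    by_cases hc : (CATEGORY.get? q.1 == some k) = true
    · have hany : st.any (fun e => e.1 == k) = true := any_key_of_mem st k hk
      have hstep : stStep amt k st q = modS st k
          (fun _ => dSet (dGet st k []) q.1 (dGet (dGet st k []) q.1 0 - amt q)) := by
        simp only [stStep, hc, if_true]
        exact dSet_eq_modS st k _ hany
      calc (q :: l).foldl (stStep amt k) st
          = l.foldl (stStep amt k) (stStep amt k st q) := rfl
        _ = modS (modS st k (fun _ => dSet (dGet st k []) q.1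
              (dGet (dGet st k []) q.1 0 - amt q))) k
              (fun sub => l.foldl (subStep amt k) sub) := by
              rw [hstep]
              exact ih _ (by rw [keys_modS]; exact hnd) (by rw [keys_modS]; exact hk)
        _ = modS st k (fun sub => l.foldl (subStep amt k)
              (dSet (dGet st k []) q.1 (dGet (dGet st k []) q.1 0 - amt q))) := modS_modS ..
        _ = modS st k (fun sub => l.foldl (subStep amt k) (subStep amt k sub q)) := by
              apply modS_congr_entry st k _ _ [] hnd hk
              simp only [subStep, hc, if_true]
    · have hc' : (CATEGORY.get? q.1 == some k) = false := by
        rwa [Bool.not_eq_true] at hc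
      have hstep : stStep amt k st q = st := by
        simp only [stStep, hc', Bool.false_eq_true, if_false]
      have hsub : ∀ sub, subStep amt k sub q = sub := by
        intro sub; simp only [subStep, hc', Bool.false_eq_true, if_false]
      calc (q :: l).foldl (stStep amt k) st
          = l.foldl (stStep amt k) st := by rw [List.foldl_cons, hstep]
        _ = modS st k (fun sub => l.foldl (subStep amt k) sub) := ih st hnd hk
        _ = modS st k (fun sub => l.foldl (subStep amt k) (subStep amt k sub q)) := by
              apply modS_congr_entry st k _ _ [] hnd hk
              rw [hsub]

-- A's six sequential category blocks are the generic table-driven step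
lemma stepA_eq (cart : List (String × List Int)) (st : List (String × List (String × Int)))
    (key : String) : stepA cart st key = cart.foldl (stStep (amtA cart) key) st := by
  by_cases h1 : key = "Processors"
  · subst h1
    simp only [stepA, beq_iff_eq]
    simp only [if_true]
    rw [if_neg (by decide : ¬("Processors":String) = "RAM"), if_neg (by decide : ¬("Processors":String) = "Storage"), if_neg (by decide : ¬("Processors":String) = "Screen"), if_neg (by decide : ¬("Processors":String) = "Case"), if_neg (by decide : ¬("Processors":String) = "USB Ports")]
    apply PySem.List.foldl_congr_mem
    intro s q _
    by_cases h3 : q.1 = "p3"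
    · have hc : CATEGORY.get? "p3" = some "Processors" := rfl
      simp [stStep, hc, h3, updA, amtA]
    · by_cases h5 : q.1 = "p5"
      · have hc : CATEGORY.get? "p5" = some "Processors" := rfl
        simp [stStep, hc, h5, updA, amtA]
      · by_cases h7 : q.1 = "p7"
        · have hc : CATEGORY.get? "p7" = some "Processors" := rfl
          simp [stStep, hc, h7, updA, amtA]
        · have hc : (CATEGORY.get? q.1 == some "Processors") = false := by
            rw [beq_eq_false_iff_ne]
            intro h
            have h2 := cat_pairs q.1 _ h
            simp only [List.mem_cons, List.not_mem_nil, or_false, Prod.mk.injEq] at h2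
            rcases h2 with ⟨h',_⟩|⟨h',_⟩|⟨h',_⟩|⟨_,h'⟩|⟨_,h'⟩|⟨_,h'⟩|⟨_,h'⟩|⟨_,h'⟩|⟨_,h'⟩|⟨_,h'⟩|⟨_,h'⟩|⟨_,h'⟩|⟨_,h'⟩
            exacts [h3 h', h5 h', h7 h', by simp at h', by simp at h', by simp at h', by simp at h', by simp at h', by simp at h', by simp at h', by simp at h', by simp at h', by simp at h']
          simp [stStep, hc, h3, h5, h7]
  · 
    by_cases h2 : key = "RAM"
    · subst h2
      simp only [stepA, beq_iff_eq]
      simp only [if_true]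
      rw [if_neg (by decide : ¬("RAM":String) = "Processors"), if_neg (by decide : ¬("RAM":String) = "Storage"), if_neg (by decide : ¬("RAM":String) = "Screen"), if_neg (by decide : ¬("RAM":String) = "Case"), if_neg (by decide : ¬("RAM":String) = "USB Ports")]
      apply PySem.List.foldl_congr_mem
      intro s q _
      by_cases h3 : q.1 = "16GB"
      · have hc : CATEGORY.get? "16GB" = some "RAM" := rfl
        simp [stStep, hc, h3, updA, amtA]
      · by_cases h5 : q.1 = "32GB"
        · have hc : CATEGORY.get? "32GB" = some "RAM" := rfl
          simp [stStep, hc, h5, updA, amtA]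
        · have hc : (CATEGORY.get? q.1 == some "RAM") = false := by
            rw [beq_eq_false_iff_ne]
            intro h
            have h2 := cat_pairs q.1 _ h
            simp only [List.mem_cons, List.not_mem_nil, or_false, Prod.mk.injEq] at h2
            rcases h2 with ⟨_,h'⟩|⟨_,h'⟩|⟨_,h'⟩|⟨h',_⟩|⟨h',_⟩|⟨_,h'⟩|⟨_,h'⟩|⟨_,h'⟩|⟨_,h'⟩|⟨_,h'⟩|⟨_,h'⟩|⟨_,h'⟩|⟨_,h'⟩
            exacts [by simp at h', by simp at h', by simp at h', h3 h', h5 h', by simp at h', by simp at h', by simp at h', by simp at h', by simp at h', by simp at h', by simp at h', by simp at h']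
          simp [stStep, hc, h3, h5]
    · 
      by_cases h3' : key = "Storage"
      · subst h3'
        simp only [stepA, beq_iff_eq]
        simp only [if_true]
        rw [if_neg (by decide : ¬("Storage":String) = "Processors"), if_neg (by decide : ¬("Storage":String) = "RAM"), if_neg (by decide : ¬("Storage":String) = "Screen"), if_neg (by decide : ¬("Storage":String) = "Case"), if_neg (by decide : ¬("Storage":String) = "USB Ports")]
        apply PySem.List.foldl_congr_mem
        intro s q _
        by_cases h3 : q.1 = "1TB"
        · have hc : CATEGORY.get? "1TB" = some "Storage" := rfl
          simp [stStep, hc, h3, updA, amtA]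
        · by_cases h5 : q.1 = "2TB"
          · have hc : CATEGORY.get? "2TB" = some "Storage" := rfl
            simp [stStep, hc, h5, updA, amtA]
          · have hc : (CATEGORY.get? q.1 == some "Storage") = false := by
              rw [beq_eq_false_iff_ne]
              intro h
              have h2 := cat_pairs q.1 _ h
              simp only [List.mem_cons, List.not_mem_nil, or_false, Prod.mk.injEq] at h2
              rcases h2 with ⟨_,h'⟩|⟨_,h'⟩|⟨_,h'⟩|⟨_,h'⟩|⟨_,h'⟩|⟨h',_⟩|⟨h',_⟩|⟨_,h'⟩|⟨_,h'⟩|⟨_,h'⟩|⟨_,h'⟩|⟨_,h'⟩|⟨_,h'⟩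
              exacts [by simp at h', by simp at h', by simp at h', by simp at h', by simp at h', h3 h', h5 h', by simp at h', by simp at h', by simp at h', by simp at h', by simp at h', by simp at h']
            simp [stStep, hc, h3, h5]
      · 
        by_cases h4 : key = "Screen"
        · subst h4
          simp only [stepA, beq_iff_eq]
          simp only [if_true]
          rw [if_neg (by decide : ¬("Screen":String) = "Processors"), if_neg (by decide : ¬("Screen":String) = "RAM"), if_neg (by decide : ¬("Screen":String) = "Storage"), if_neg (by decide : ¬("Screen":String) = "Case"), if_neg (by decide : ¬("Screen":String) = "USB Ports")]
          apply PySem.List.foldl_congr_mem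
          intro s q _
          by_cases h3 : q.1 = "19inch"
          · have hc : CATEGORY.get? "19inch" = some "Screen" := rfl
            simp [stStep, hc, h3, updA, amtA]
          · by_cases h5 : q.1 = "23inch"
            · have hc : CATEGORY.get? "23inch" = some "Screen" := rfl
              simp [stStep, hc, h5, updA, amtA]
            · have hc : (CATEGORY.get? q.1 == some "Screen") = false := by
                rw [beq_eq_false_iff_ne]
                intro h
                have h2 := cat_pairs q.1 _ h
                simp only [List.mem_cons, List.not_mem_nil, or_false, Prod.mk.injEq] at h2
                rcases h2 with ⟨_,h'⟩|⟨_,h'⟩|⟨_,h'⟩|⟨_,h'⟩|⟨_,h'⟩|⟨_,h'⟩|⟨_,h'⟩|⟨h',_⟩|⟨h',_⟩|⟨_,h'⟩|⟨_,h'⟩|⟨_,h'⟩|⟨_,h'⟩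
                exacts [by simp at h', by simp at h', by simp at h', by simp at h', by simp at h', by simp at h', by simp at h', h3 h', h5 h', by simp at h', by simp at h', by simp at h', by simp at h']
              simp [stStep, hc, h3, h5]
        · 
          by_cases h5' : key = "Case"
          · subst h5'
            simp only [stepA, beq_iff_eq]
            simp only [if_true]
            rw [if_neg (by decide : ¬("Case":String) = "Processors"), if_neg (by decide : ¬("Case":String) = "RAM"), if_neg (by decide : ¬("Case":String) = "Storage"), if_neg (by decide : ¬("Case":String) = "Screen"), if_neg (by decide : ¬("Case":String) = "USB Ports")]
            apply PySem.List.foldl_congr_mem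
            intro s q _
            by_cases h3 : q.1 = "Mini Tower"
            · have hc : CATEGORY.get? "Mini Tower" = some "Case" := rfl
              simp [stStep, hc, h3, updA, amtA]
            · by_cases h5 : q.1 = "Midi Tower"
              · have hc : CATEGORY.get? "Midi Tower" = some "Case" := rfl
                simp [stStep, hc, h5, updA, amtA]
              · have hc : (CATEGORY.get? q.1 == some "Case") = false := by
                  rw [beq_eq_false_iff_ne]
                  intro h
                  have h2 := cat_pairs q.1 _ h
                  simp only [List.mem_cons, List.not_mem_nil, or_false, Prod.mk.injEq] at h2
                  rcases h2 with ⟨_,h'⟩|⟨_,h'⟩|⟨_,h'⟩|⟨_,h'⟩|⟨_,h'⟩|⟨_,h'⟩|⟨_,h'⟩|⟨_,h'⟩|⟨_,h'⟩|⟨h',_⟩|⟨h',_⟩|⟨_,h'⟩|⟨_,h'⟩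
                  exacts [by simp at h', by simp at h', by simp at h', by simp at h', by simp at h', by simp at h', by simp at h', by simp at h', by simp at h', h3 h', h5 h', by simp at h', by simp at h']
                simp [stStep, hc, h3, h5]
          · 
            by_cases h6 : key = "USB Ports"
            · subst h6
              simp only [stepA, beq_iff_eq]
              simp only [if_true]
              rw [if_neg (by decide : ¬("USB Ports":String) = "Processors"), if_neg (by decide : ¬("USB Ports":String) = "RAM"), if_neg (by decide : ¬("USB Ports":String) = "Storage"), if_neg (by decide : ¬("USB Ports":String) = "Screen"), if_neg (by decide : ¬("USB Ports":String) = "Case")]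
              apply PySem.List.foldl_congr_mem
              intro s q _
              by_cases h3 : q.1 = "2 Ports"
              · have hc : CATEGORY.get? "2 Ports" = some "USB Ports" := rfl
                simp [stStep, hc, h3, updA, amtA]
              · by_cases h5 : q.1 = "4 Ports"
                · have hc : CATEGORY.get? "4 Ports" = some "USB Ports" := rfl
                  simp [stStep, hc, h5, updA, amtA]
                · have hc : (CATEGORY.get? q.1 == some "USB Ports") = false := by
                    rw [beq_eq_false_iff_ne]
                    intro h
                    have h2 := cat_pairs q.1 _ h
                    simp only [List.mem_cons, List.not_mem_nil, or_false, Prod.mk.injEq] at h2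
                    rcases h2 with ⟨_,h'⟩|⟨_,h'⟩|⟨_,h'⟩|⟨_,h'⟩|⟨_,h'⟩|⟨_,h'⟩|⟨_,h'⟩|⟨_,h'⟩|⟨_,h'⟩|⟨_,h'⟩|⟨_,h'⟩|⟨h',_⟩|⟨h',_⟩
                    exacts [by simp at h', by simp at h', by simp at h', by simp at h', by simp at h', by simp at h', by simp at h', by simp at h', by simp at h', by simp at h', by simp at h', h3 h', h5 h']
                  simp [stStep, hc, h3, h5]
            · have hL : stepA cart st key = st := by
                simp [stepA, beq_eq_false_iff_ne.mpr h1, beq_eq_false_iff_ne.mpr h2,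
                  beq_eq_false_iff_ne.mpr h3', beq_eq_false_iff_ne.mpr h4,
                  beq_eq_false_iff_ne.mpr h5', beq_eq_false_iff_ne.mpr h6]
              have hR : cart.foldl (stStep (amtA cart) key) st = st := by
                apply foldl_fix
                intro st' q _
                have hc : (CATEGORY.get? q.1 == some key) = false := by
                  rw [beq_eq_false_iff_ne]
                  intro h
                  rcases cat_snd q.1 key h with h' | h' | h' | h' | h' | h'
                  exacts [h1 h', h2 h', h3' h', h4 h', h5' h', h6 h']
                simp only [stStep, hc, Bool.false_eq_true, if_false]
              rw [hL, hR]

-- LOOP LEMMA 2: folding the per-key modifications over the (distinct) keys is a map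
lemma foldl_modS_cons {v : Type} (g : String → v → v) (ks : List String) (a : String × v)
    (t : List (String × v)) (h : ∀ k ∈ ks, k ≠ a.1) :
    ks.foldl (fun st' k => modS st' k (g k)) (a :: t)
      = a :: ks.foldl (fun st' k => modS st' k (g k)) t := by
  induction ks generalizing t with
  | nil => rfl
  | cons k0 ks ih =>
    have hk : a.1 ≠ k0 := fun he => h k0 (by simp) he.symm
    have hmod : modS (a :: t) k0 (g k0) = a :: modS t k0 (g k0) := by
      rw [modS_cons, if_neg hk]
    rw [List.foldl_cons, hmod, List.foldl_cons]
    exact ih _ (fun k' hk' => h k' (by simp [hk']))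

lemma foldl_modS_keys {v : Type} (g : String → v → v) :
    ∀ st : List (String × v), (st.map Prod.fst).Nodup →
      (st.map Prod.fst).foldl (fun st' k => modS st' k (g k)) st
        = st.map (fun e => (e.1, g e.1 e.2)) := by
  intro st
  induction st with
  | nil => intro _; rfl
  | cons e t ih =>
    intro hnd
    rw [List.map_cons, List.nodup_cons] at hnd
    have h1 : modS (e :: t) e.1 (g e.1) = (e.1, g e.1 e.2) :: t := by
      rw [modS_cons, if_pos rfl, modS_of_not_mem t e.1 (g e.1) hnd.1]
    rw [List.map_cons, List.foldl_cons, h1,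
      foldl_modS_cons g (t.map Prod.fst) (e.1, g e.1 e.2) t
        (fun k hk he => hnd.1 (he ▸ hk)), ih hnd.2, List.map_cons]

-- B's loop is the same per-entry map
lemma B_eq_map :
    ∀ (cart : List (String × List Int)) (st : List (String × List (String × Int))),
      (st.map Prod.fst).Nodup →
      correctStock_alt cart st
        = st.map (fun e => (e.1, cart.foldl (subStep amtB e.1) e.2)) := by
  intro cart
  induction cart with
  | nil =>
    intro st _
    simp only [correctStock_alt, List.foldl_nil]
    conv_lhs => rw [← List.map_id st]
    apply List.map_congr_left
    intro e _
    rfl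
  | cons q cs ih =>
    intro st hnd
    rcases hC : CATEGORY.get? q.1 with _ | cat
    · have h0 : correctStock_alt (q :: cs) st = correctStock_alt cs st := by
        simp only [correctStock_alt, List.foldl_cons, hC]
      rw [h0, ih st hnd]
      apply List.map_congr_left
      intro e _
      have hsub : subStep amtB e.1 e.2 q = e.2 := by
        simp [subStep, hC]
      simp only [List.foldl_cons, hsub]
    · by_cases hg : st.any (fun e => e.1 == cat) = true
      · have h0 : correctStock_alt (q :: cs) st = correctStock_alt cs (updB st cat q.1 q.2) := by
          simp only [correctStock_alt, List.foldl_cons, hC, hg, if_true]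
        have hupd : updB st cat q.1 q.2 = modS st cat
            (fun _ => dSet (dGet st cat []) q.1
              (dGet (dGet st cat []) q.1 0 - PySem.List.pyGetD q.2 1 0)) := by
          simp only [updB]
          exact dSet_eq_modS st cat _ hg
        rw [h0, hupd, ih _ (by rw [keys_modS]; exact hnd)]
        unfold modS
        rw [List.map_map]
        apply List.map_congr_left
        intro e he
        by_cases hek : e.1 = cat
        · have hmemc : (cat, e.2) ∈ st := by rw [← hek]; simpa using he
          have hget : dGet st cat [] = e.2 := dGet_eq_of_mem st cat e.2 [] hnd hmemc
          have hsub : subStep amtB e.1 e.2 q = dSet (dGet st cat []) q.1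
              (dGet (dGet st cat []) q.1 0 - PySem.List.pyGetD q.2 1 0) := by
            simp [subStep, hC, hek, amtB, hget]
          rw [List.foldl_cons, hsub]
          simp [Function.comp_apply, hek]
        · have hsub : subStep amtB e.1 e.2 q = e.2 := by
            have hne : (some cat == some e.1) = false := by
              rw [beq_eq_false_iff_ne]
              exact fun h => hek (Option.some.inj h).symm
            simp [subStep, hC, hne]
          rw [List.foldl_cons, hsub]
          simp [Function.comp_apply, hek]
      · have h0 : correctStock_alt (q :: cs) st = correctStock_alt cs st := by
          simp only [correctStock_alt, List.foldl_cons, hC]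
          rw [if_neg (by simp [hg])]
        rw [h0, ih st hnd]
        apply List.map_congr_left
        intro e he
        have hek : e.1 ≠ cat := by
          intro hek
          rw [Bool.not_eq_true, List.any_eq_false] at hg
          exact absurd (by simp [hek]) (hg e he)
        have hsub : subStep amtB e.1 e.2 q = e.2 := by
          have : (some cat == some e.1) = false := by
            rw [beq_eq_false_iff_ne]
            exact fun h => hek (Option.some.inj h).symm
          simp [subStep, hC, this]
        simp only [List.foldl_cons, hsub]

-- the outer loop of A, rewritten key by key
lemma A_eq_map (cart : List (String × List Int)) :
    ∀ (ks : List String) (st : List (String × List (String × Int))),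
      (st.map Prod.fst).Nodup → (∀ k ∈ ks, k ∈ st.map Prod.fst) →
      ks.foldl (fun st' k => cart.foldl (stStep (amtA cart) k) st') st
        = ks.foldl (fun st' k => modS st' k
            (fun sub => cart.foldl (subStep (amtA cart) k) sub)) st := by
  intro ks
  induction ks with
  | nil => intro st _ _; rfl
  | cons k0 ks ih =>
    intro st hnd hmem
    rw [List.foldl_cons, List.foldl_cons,
      foldl_stStep_eq_modS (amtA cart) k0 cart st hnd (hmem k0 (by simp))]
    exact ih _ (by rw [keys_modS]; exact hnd)
      (fun k hk => by rw [keys_modS]; exact hmem k (by simp [hk]))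

-- ===== VERDICT (by name: the statement is the Claim_ definition above) =====
theorem correctStock_spec : Claim_equal_correctStock := by
  intro cart stock _ hpre
  obtain ⟨hcart, hstock, _⟩ := hpre
  unfold Spec_correctStock
  have hA : correctStock cart stock
      = stock.map (fun e => (e.1, cart.foldl (subStep (amtA cart) e.1) e.2)) := by
    unfold correctStock
    have h1 : stepA cart = fun st k => cart.foldl (stStep (amtA cart) k) st := by
      funext st k; exact stepA_eq cart st k
    rw [h1, A_eq_map cart (stock.map Prod.fst) stock hstock (fun _ hk => hk),
      foldl_modS_keys _ stock hstock]
  rw [hA, B_eq_map cart stock hstock]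
  apply List.map_congr_left
  intro e _
  have hfold : cart.foldl (subStep (amtA cart) e.1) e.2
      = cart.foldl (subStep amtB e.1) e.2 := by
    apply PySem.List.foldl_congr_mem
    intro sub q hq
    have hamt : amtA cart q = amtB q := by
      have : dGet cart q.1 [] = q.2 :=
        dGet_eq_of_mem cart q.1 q.2 [] hcart (by rw [Prod.mk.eta]; exact hq)
      simp [amtA, amtB, this]
    simp only [subStep, hamt]
  rw [hfold]
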